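-- pv_equiv track=rewrite | github.com/JonathanKarr33/keo | keo/sensemaking_QA/evaluator.py | _parse_comparison_scores
-- ===== SOURCE A (Python) =====
-- from typing import List, Dict, Optional, Tuple
--
-- def _parse_comparison_scores(comparison_text: str) -> Dict:
--     """Parse pairwise comparison scores"""
--     scores = {}
--     lines = comparison_text.split('\n')
--
--     criteria = ['Comprehensiveness', 'Supporting Evidence', 'Diverse Perspectives', 'Factual Accuracy', 'Overall Preference']
--
--     for line in lines:
--         for criterion in criteria:
--             if line.startswith(criterion):
--                 try:
--                     result_part = line.split(':')[1].strip()
--                     if result_part.startswith('A'):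
--                         scores[criterion.lower().replace(' ', '_')] = 'vanilla'
--                     elif result_part.startswith('B'):
--                         scores[criterion.lower().replace(' ', '_')] = 'graphrag'
--                     else:
--                         scores[criterion.lower().replace(' ', '_')] = 'tie'
--                 except:
--                     scores[criterion.lower().replace(' ', '_')] = 'tie'
--
--     return scores
-- ===== SOURCE B (Python) =====
-- from typing import List, Dict, Optional, Tuple
--
-- CRITERIA = ['Comprehensiveness', 'Supporting Evidence', 'Diverse Perspectives', 'Factual Accuracy', 'Overall Preference']
--
-- def _verdict(line):
--     parts = line.split(':')
--     if len(parts) < 2: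
--         return 'tie'
--     result = parts[1].strip()
--     if result.startswith('A'):
--         return 'vanilla'
--     if result.startswith('B'):
--         return 'graphrag'
--     return 'tie'
--
-- def _parse_comparison_scores(comparison_text: str) -> Dict:
--     """Parse pairwise comparison scores, criterion by criterion."""
--     lines = comparison_text.split('\n')
--     scores = {}
--     for criterion in CRITERIA:
--         for line in reversed(lines):
--             if line.startswith(criterion):
--                 scores[criterion.lower().replace(' ', '_')] = _verdict(line)
--                 break
--     return scores
-- ===== Notes on version B (the rewrite author's own statement) =====
-- stated objective: alternative
-- what changed: B is criterion-major: for each of the five criteria it scans the lines in reverse for the last matching line and parses it once, instead of A's line-major pass with a nested criteria loop and repeated dict overwrites; Pre_ excludes texts whose criteria lines first appear out of the fixed criteria order, where A's dict insertion order (first appearance) is accidental - the two programs return equal dicts there, only the association-list order differs.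
import Mathlib
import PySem

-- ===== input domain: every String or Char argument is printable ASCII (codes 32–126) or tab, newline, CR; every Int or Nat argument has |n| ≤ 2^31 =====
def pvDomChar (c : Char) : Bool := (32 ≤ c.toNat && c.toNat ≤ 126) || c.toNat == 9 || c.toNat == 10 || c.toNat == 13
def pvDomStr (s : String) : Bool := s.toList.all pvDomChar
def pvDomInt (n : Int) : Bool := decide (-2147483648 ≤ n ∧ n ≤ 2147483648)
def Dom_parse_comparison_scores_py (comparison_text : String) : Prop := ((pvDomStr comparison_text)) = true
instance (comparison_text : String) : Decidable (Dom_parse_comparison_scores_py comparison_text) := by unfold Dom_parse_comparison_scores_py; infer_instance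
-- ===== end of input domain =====

-- B parses criterion-major (per criterion, last matching line) instead of A's line-major dict-overwrite
-- pass; equal results inside Pre_, which excludes texts whose criteria lines first appear out of the
-- fixed criteria order (there the dict insertion orders differ). Objective: alternative.

-- s.split(sep) for a non-empty literal sep — exact: thin String wrapper over PySem.Chars.splitOn
def pvSplit (s sep : String) : List String :=
  (PySem.Chars.splitOn s.toList sep.toList).map String.ofList

-- the criteria list (a literal in both A and B)
def pvCriteria : List String :=
  ["Comprehensiveness", "Supporting Evidence", "Diverse Perspectives", "Factual Accuracy", "Overall Preference"]

-- criterion.lower().replace(' ', '_'), the key expression both sources write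
def pvKeyOf (criterion : String) : String :=
  PySem.Str.replace (PySem.Str.lower criterion) " " "_"

-- ===== PORT A =====
-- body of A's inner `for criterion in criteria` loop (try/except: pyGet? none = the caught IndexError)
def pvStepA (line : String) (scores : PySem.Dict String String) (criterion : String) :
    PySem.Dict String String :=
  if PySem.Str.startswith line criterion then
    match PySem.List.pyGet? (pvSplit line ":") 1 with
    | none => scores.insert (pvKeyOf criterion) "tie"
    | some s =>
      let result_part := PySem.Str.strip s
      if PySem.Str.startswith result_part "A" then
        scores.insert (pvKeyOf criterion) "vanilla"
      else if PySem.Str.startswith result_part "B" then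
        scores.insert (pvKeyOf criterion) "graphrag"
      else
        scores.insert (pvKeyOf criterion) "tie"
  else scores

def parse_comparison_scores_py (comparison_text : String) : List (String × String) :=
  let lines := pvSplit comparison_text "\n"
  (lines.foldl (fun scores line => pvCriteria.foldl (pvStepA line) scores) PySem.Dict.empty).items

-- ===== PORT B =====
-- B's `_verdict` (checked index: getD after the length test, exact)
def pvVerdictB (line : String) : String :=
  let parts := pvSplit line ":"
  if parts.length < 2 then "tie"
  else
    let result := PySem.Str.strip (parts.getD 1 "")
    if PySem.Str.startswith result "A" then "vanilla"
    else if PySem.Str.startswith result "B" then "graphrag"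
    else "tie"

-- body of B's `for criterion in CRITERIA` loop (reverse scan + break = find? on the reversed list)
def pvStepB (lines : List String) (scores : PySem.Dict String String) (criterion : String) :
    PySem.Dict String String :=
  match lines.reverse.find? (fun line => PySem.Str.startswith line criterion) with
  | some line => scores.insert (pvKeyOf criterion) (pvVerdictB line)
  | none => scores

def parse_comparison_scores_py_alt (comparison_text : String) : List (String × String) :=
  let lines := pvSplit comparison_text "\n"
  (pvCriteria.foldl (pvStepB lines) PySem.Dict.empty).items

-- ===== PRECONDITION & SPEC =====
-- Pre_ excludes texts whose criteria lines first appear out of the fixed criteria order: A's dict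
-- insertion order (order of first appearance) is accidental there — the two programs return equal
-- dicts, only the order of the association list differs.
def Pre_parse_comparison_scores_py (comparison_text : String) : Prop :=
  (PySem.Set.ofList ((pvSplit comparison_text "\n").filterMap
    (fun line => pvCriteria.find? (fun c => PySem.Str.startswith line c)))).Sublist pvCriteria
instance (comparison_text : String) : Decidable (Pre_parse_comparison_scores_py comparison_text) := by unfold Pre_parse_comparison_scores_py; infer_instance
def pvWitness_parse_comparison_scores_py : String := "Comprehensiveness: A\nOverall Preference: B"
def Spec_parse_comparison_scores_py (comparison_text : String) (out : List (String × String)) : Prop := out = parse_comparison_scores_py_alt comparison_text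
instance (comparison_text : String) (out : List (String × String)) : Decidable (Spec_parse_comparison_scores_py comparison_text out) := by unfold Spec_parse_comparison_scores_py; infer_instance

-- ===== CLAIM (what is proved, stated in full; the proofs are below) =====
def Claim_equal_parse_comparison_scores_py : Prop := ∀ (comparison_text : String), Dom_parse_comparison_scores_py comparison_text → Pre_parse_comparison_scores_py comparison_text → Spec_parse_comparison_scores_py comparison_text (parse_comparison_scores_py comparison_text)

-- ===== LEMMAS AND PROOFS =====

-- matched lines with their (first-matching) criterion / their criterion only
def pvMp (ls : List String) : List (String × String) :=
  ls.filterMap (fun ln => (pvCriteria.find? (fun c => PySem.Str.startswith ln c)).map (fun c => (c, ln)))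
def pvMs (ls : List String) : List String :=
  ls.filterMap (fun ln => pvCriteria.find? (fun c => PySem.Str.startswith ln c))

-- B's phase-2 value for a criterion
def pvVB (lines : List String) (c : String) : String :=
  pvVerdictB ((lines.reverse.find? (fun ln => PySem.Str.startswith ln c)).getD "")

-- two distinct criteria never both prefix the same line
theorem pv_not_both (ln c c' : String)
    (h : ¬ (c.toList <+: c'.toList) ∧ ¬ (c'.toList <+: c.toList)) :
    ¬ (PySem.Str.startswith ln c = true ∧ PySem.Str.startswith ln c' = true) := by
  rintro ⟨h1, h2⟩
  rw [PySem.Str.startswith_eq, PySem.Chars.startswith_iff] at h1 h2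
  rcases List.prefix_or_prefix_of_prefix h1 h2 with hp | hp
  · exact h.1 hp
  · exact h.2 hp

theorem pv_startswith_unique {c c' ln : String} (hc : c ∈ pvCriteria) (hc' : c' ∈ pvCriteria)
    (h1 : PySem.Str.startswith ln c = true) (h2 : PySem.Str.startswith ln c' = true) : c = c' := by
  simp only [pvCriteria, List.mem_cons, List.not_mem_nil, or_false] at hc hc'
  rcases hc with rfl | rfl | rfl | rfl | rfl <;> rcases hc' with rfl | rfl | rfl | rfl | rfl <;>
    first
      | rfl
      | exact absurd ⟨h1, h2⟩ (pv_not_both ln _ _ (by decide))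

-- find? facts for the criteria list
theorem pv_find_mem {ln c : String}
    (h : pvCriteria.find? (fun c' => PySem.Str.startswith ln c') = some c) :
    c ∈ pvCriteria ∧ PySem.Str.startswith ln c = true :=
  ⟨List.mem_of_find?_eq_some h, List.find?_some h⟩

theorem pv_find_none {ln : String}
    (h : pvCriteria.find? (fun c' => PySem.Str.startswith ln c') = none) :
    ∀ c ∈ pvCriteria, PySem.Str.startswith ln c = false := by
  intro c hc
  have := List.find?_eq_none.mp h c hc
  simpa using this

theorem pv_find_of_sw {ln c : String} (hc : c ∈ pvCriteria)
    (hs : PySem.Str.startswith ln c = true) :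
    pvCriteria.find? (fun c' => PySem.Str.startswith ln c') = some c := by
  cases h : pvCriteria.find? (fun c' => PySem.Str.startswith ln c') with
  | none =>
    have h0 := pv_find_none h c hc
    rw [h0] at hs
    cases hs
  | some c' =>
    obtain ⟨hc', hs'⟩ := pv_find_mem h
    rw [pv_startswith_unique hc' hc hs' hs]

-- xs[1] in A's try = xs[1]? (nonnegative literal index)
theorem pv_get1 (l : List String) : PySem.List.pyGet? l (1 : Int) = l[(1 : Nat)]? := by
  rw [show (1 : Int) = ((1 : Nat) : Int) from rfl, PySem.List.pyGet?_natCast]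

-- on a matching line, A's try/except branch computes one insert of B's _verdict
theorem pv_valA_eq (ln : String) (d : PySem.Dict String String) (c : String)
    (hs : PySem.Str.startswith ln c = true) :
    pvStepA ln d c = d.insert (pvKeyOf c) (pvVerdictB ln) := by
  rw [pvStepA, if_pos hs, pvVerdictB]
  cases h : PySem.List.pyGet? (pvSplit ln ":") 1 with
  | none =>
    have hlen : (pvSplit ln ":").length < 2 := by
      rw [pv_get1] at h
      have := List.getElem?_eq_none_iff.mp h
      omega
    simp [hlen]
  | some s =>
    have hg : (pvSplit ln ":")[(1 : Nat)]? = some s := by rw [← pv_get1]; exact h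
    have hlen : ¬ (pvSplit ln ":").length < 2 := by
      obtain ⟨hlt, -⟩ := List.getElem?_eq_some_iff.mp hg
      omega
    have hgd : (pvSplit ln ":").getD 1 "" = s := by
      rw [List.getD_eq_getElem?_getD, hg]; rfl
    simp only [if_neg hlen, hgd]
    split_ifs <;> rfl

theorem pv_stepA_skip (ln : String) (d : PySem.Dict String String) (c : String)
    (hs : PySem.Str.startswith ln c = false) : pvStepA ln d c = d := by
  rw [PySem.Str.startswith_eq] at hs
  rw [pvStepA, if_neg (by simp [hs])]

theorem pv_fold_skip (ln : String) (cs : List String) (d : PySem.Dict String String)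
    (h : ∀ c ∈ cs, PySem.Str.startswith ln c = false) :
    cs.foldl (pvStepA ln) d = d := by
  induction cs generalizing d with
  | nil => rfl
  | cons x rest ih =>
    rw [List.foldl_cons, pv_stepA_skip ln d x (h x List.mem_cons_self)]
    exact ih d (fun c hc => h c (List.mem_cons_of_mem _ hc))

-- A's inner loop over the criteria = one insert for the (unique) first-matching criterion
theorem pv_innerA (ln : String) (cs : List String) (hsub : cs.Sublist pvCriteria)
    (d : PySem.Dict String String) :
    cs.foldl (pvStepA ln) d =
      match cs.find? (fun c => PySem.Str.startswith ln c) with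
      | some c => d.insert (pvKeyOf c) (pvVerdictB ln)
      | none => d := by
  induction cs generalizing d with
  | nil => rfl
  | cons x rest ih =>
    have hx_mem : x ∈ pvCriteria := hsub.subset List.mem_cons_self
    have hrest : rest.Sublist pvCriteria := (List.sublist_cons_self x rest).trans hsub
    have hnodup : (x :: rest).Nodup := hsub.nodup (by decide)
    by_cases hs : PySem.Str.startswith ln x = true
    · rw [List.find?_cons_of_pos hs, List.foldl_cons, pv_valA_eq ln d x hs]
      apply pv_fold_skip
      intro c hc
      by_contra hcc
      have : x = c :=
        pv_startswith_unique hx_mem (hrest.subset hc) hs (by simpa using hcc)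
      exact (List.nodup_cons.mp hnodup).1 (this ▸ hc)
    · rw [List.find?_cons_of_neg (by simpa using hs), List.foldl_cons,
        pv_stepA_skip ln d x (by simpa using hs)]
      exact ih hrest d

-- A's outer fold = a fold of plain inserts over the matched (criterion, line) pairs
theorem pv_foldA (ls : List String) (d : PySem.Dict String String) :
    ls.foldl (fun scores line => pvCriteria.foldl (pvStepA line) scores) d =
      (pvMp ls).foldl (fun d p => d.insert (pvKeyOf p.1) (pvVerdictB p.2)) d := by
  induction ls generalizing d with
  | nil => rfl
  | cons ln rest ih =>
    rw [List.foldl_cons, pv_innerA ln pvCriteria (List.Sublist.refl _) d]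
    cases h : pvCriteria.find? (fun c => PySem.Str.startswith ln c) with
    | none =>
      rw [show pvMp (ln :: rest) = pvMp rest from by
        simp only [pvMp, List.filterMap_cons, h, Option.map_none]]
      exact ih d
    | some c =>
      rw [show pvMp (ln :: rest) = (c, ln) :: pvMp rest from by
        simp only [pvMp, List.filterMap_cons, h, Option.map_some], List.foldl_cons]
      exact ih _

-- lookup in a fold of inserts = value of the LAST insert with that key
theorem pv_get_foldl_insert {α : Type} (g : α → String) (v : α → String)
    (l : List α) (d : PySem.Dict String String) (k : String) :
    (l.foldl (fun d p => d.insert (g p) (v p)) d).get? k =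
      match l.reverse.find? (fun p => g p == k) with
      | some p => some (v p)
      | none => d.get? k := by
  induction l generalizing d with
  | nil => rfl
  | cons p rest ih =>
    rw [List.foldl_cons, ih, List.reverse_cons, List.find?_append]
    cases hf : rest.reverse.find? (fun p => g p == k) with
    | some q => simp
    | none =>
      rw [Option.none_or]
      by_cases hk : ((fun p => g p == k) p) = true
      · rw [List.find?_cons_of_pos (p := fun q => g q == k) (a := p) (l := []) hk]
        have hgk : g p = k := by simpa using hk
        subst hgk
        exact PySem.Dict.get?_insert_self d (g p) (v p)
      · rw [List.find?_cons_of_neg (p := fun q => g q == k) (a := p) (l := []) hk, List.find?_nil]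
        have hne : k ≠ g p := fun h => hk (by simp [h])
        exact PySem.Dict.get?_insert_of_ne d _ hne

-- the snake_case keys are distinct on the five criteria
theorem pv_key_inj : ∀ a ∈ pvCriteria, ∀ b ∈ pvCriteria, pvKeyOf a = pvKeyOf b → a = b := by decide

-- dedup commutes with an injective map
theorem pv_ofList_map (f : String → String) :
    ∀ (xs acc : List String),
      (∀ a b, (a ∈ acc ∨ a ∈ xs) → (b ∈ acc ∨ b ∈ xs) → f a = f b → a = b) →
      (xs.map f).foldl PySem.Set.add (acc.map f) = (xs.foldl PySem.Set.add acc).map f := by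
  intro xs
  induction xs with
  | nil => intro acc _; rfl
  | cons x rest ih =>
    intro acc hinj
    rw [List.map_cons, List.foldl_cons, List.foldl_cons]
    have hcont : PySem.Set.contains (acc.map f) (f x) = PySem.Set.contains acc x := by
      by_cases hmem : x ∈ acc
      · simp [PySem.Set.contains, hmem, List.mem_map_of_mem]
      · have : f x ∉ acc.map f := by
          intro hfm
          obtain ⟨a, ha, hfa⟩ := List.mem_map.mp hfm
          exact hmem (hinj a x (Or.inl ha) (Or.inr List.mem_cons_self) hfa ▸ ha)
        simp [PySem.Set.contains, hmem, this]
    rw [PySem.Set.add, PySem.Set.add, hcont]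
    by_cases hmem : PySem.Set.contains acc x = true
    · rw [if_pos hmem, if_pos hmem]
      exact ih acc (fun a b ha hb => hinj a b
        (ha.imp id (List.mem_cons_of_mem x)) (hb.imp id (List.mem_cons_of_mem x)))
    · rw [if_neg hmem, if_neg hmem,
        show List.map f acc ++ [f x] = List.map f (acc ++ [x]) from by simp]
      exact ih (acc ++ [x]) (fun a b ha hb => hinj a b
        (by rcases ha with ha | ha
            · rcases List.mem_append.mp ha with h | h
              · exact Or.inl h
              · exact Or.inr (by simpa using List.mem_cons.mpr (Or.inl (by simpa using h)))
            · exact Or.inr (List.mem_cons_of_mem x ha))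
        (by rcases hb with hb | hb
            · rcases List.mem_append.mp hb with h | h
              · exact Or.inl h
              · exact Or.inr (by simpa using List.mem_cons.mpr (Or.inl (by simpa using h)))
            · exact Or.inr (List.mem_cons_of_mem x hb)))

-- the keys A inserts, in line order
theorem pv_mp_fst (ls : List String) :
    (pvMp ls).map (fun p => pvKeyOf p.1) = (pvMs ls).map pvKeyOf := by
  induction ls with
  | nil => rfl
  | cons ln rest ih =>
    cases h : pvCriteria.find? (fun c => PySem.Str.startswith ln c) with
    | none => simp only [pvMp, pvMs, List.filterMap_cons, h] at *; exact ih
    | some c =>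
      simp only [pvMp, pvMs, List.filterMap_cons, h, Option.map_some, List.map_cons] at *
      rw [ih]

-- the last A-insert for a criterion's key comes from the last line starting with it
theorem pv_find_mp {c : String} (hc : c ∈ pvCriteria) (ls : List String) :
    (pvMp ls).find? (fun p => pvKeyOf p.1 == pvKeyOf c) =
      (ls.find? (fun ln => PySem.Str.startswith ln c)).map (fun ln => (c, ln)) := by
  induction ls with
  | nil => rfl
  | cons ln rest ih =>
    cases h : pvCriteria.find? (fun c' => PySem.Str.startswith ln c') with
    | none =>
      have hsw : PySem.Str.startswith ln c = false := pv_find_none h c hc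
      rw [show pvMp (ln :: rest) = pvMp rest from by
        simp only [pvMp, List.filterMap_cons, h, Option.map_none]]
      rw [List.find?_cons_of_neg (p := fun ln => PySem.Str.startswith ln c) (a := ln)
        (l := rest) (by simp only [hsw]; decide)]
      exact ih
    | some c' =>
      obtain ⟨hc'm, hsw'⟩ := pv_find_mem h
      rw [show pvMp (ln :: rest) = (c', ln) :: pvMp rest from by
        simp only [pvMp, List.filterMap_cons, h, Option.map_some]]
      by_cases hcc : c' = c
      · subst hcc
        rw [List.find?_cons_of_pos (p := fun p => pvKeyOf p.1 == pvKeyOf c') (a := (c', ln))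
          (l := pvMp rest) (by simp),
          List.find?_cons_of_pos (p := fun ln => PySem.Str.startswith ln c') (a := ln)
          (l := rest) hsw']
        rfl
      · have hk : (pvKeyOf c' == pvKeyOf c) = false := by
          by_contra hb
          exact hcc (pv_key_inj c' hc'm c hc (by simpa using hb))
        have hsw : PySem.Str.startswith ln c = false := by
          by_contra hb
          exact hcc (pv_startswith_unique hc'm hc hsw' (by simpa using hb))
        rw [List.find?_cons_of_neg (p := fun p => pvKeyOf p.1 == pvKeyOf c) (a := (c', ln))
          (l := pvMp rest) (by simp only [hk]; decide),
          List.find?_cons_of_neg (p := fun ln => PySem.Str.startswith ln c) (a := ln)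
          (l := rest) (by simp only [hsw]; decide)]
        exact ih

-- A's items = one (key, last-match verdict) pair per matched criterion, in first-appearance order
theorem pv_itemsA (lines : List String) :
    (lines.foldl (fun scores line => pvCriteria.foldl (pvStepA line) scores)
        PySem.Dict.empty).items =
      (PySem.Set.ofList (pvMs lines)).map (fun c => (pvKeyOf c, pvVB lines c)) := by
  have hms_sub : ∀ c ∈ pvMs lines, c ∈ pvCriteria := by
    intro c hc
    rw [pvMs, List.mem_filterMap] at hc
    obtain ⟨ln, _, hm⟩ := hc
    exact (pv_find_mem hm).1
  rw [pv_foldA lines PySem.Dict.empty]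
  have hkeys : ((pvMp lines).foldl (fun d p => d.insert (pvKeyOf p.1) (pvVerdictB p.2))
      PySem.Dict.empty).keys = (PySem.Set.ofList (pvMs lines)).map pvKeyOf := by
    rw [PySem.Dict.keys_foldl_insert_key (pvMp lines) (fun p => pvKeyOf p.1)
        (fun _ p => pvVerdictB p.2) PySem.Dict.empty]
    have : (PySem.Dict.empty : PySem.Dict String String).keys = ([] : List String) := by rfl
    rw [this, PySem.Set.update, pv_mp_fst]
    rw [show ([] : List String) = List.map pvKeyOf [] from rfl]
    rw [pv_ofList_map pvKeyOf (pvMs lines) []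
        (fun a b ha hb => pv_key_inj a (hms_sub a (by tauto)) b (hms_sub b (by tauto)))]
    rw [← PySem.Set.ofList_eq_foldl]
  have hnodupA : ((pvMp lines).foldl (fun d p => d.insert (pvKeyOf p.1) (pvVerdictB p.2))
      PySem.Dict.empty).keys.Nodup :=
    PySem.Dict.nodup_keys_foldl_insert_key (pvMp lines) (fun p => pvKeyOf p.1)
      (fun _ p => pvVerdictB p.2) PySem.Dict.empty
      (by rw [show (PySem.Dict.empty : PySem.Dict String String).keys = ([] : List String) from rfl]
          exact List.nodup_nil)
  have hval : ∀ c ∈ PySem.Set.ofList (pvMs lines),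
      ((pvMp lines).foldl (fun d p => d.insert (pvKeyOf p.1) (pvVerdictB p.2))
        PySem.Dict.empty).getD (pvKeyOf c) "tie" = pvVB lines c := by
    intro c hc
    have hcC : c ∈ pvCriteria := hms_sub c ((PySem.Set.mem_ofList _ _).mp hc)
    obtain ⟨-, ln, hln, hsw⟩ : c ∈ pvCriteria ∧ ∃ ln ∈ lines, PySem.Str.startswith ln c = true := by
      have hm := (PySem.Set.mem_ofList _ _).mp hc
      rw [pvMs, List.mem_filterMap] at hm
      obtain ⟨ln, hln, hfind⟩ := hm
      obtain ⟨h1, h2⟩ := pv_find_mem hfind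
      exact ⟨h1, ln, hln, h2⟩
    have hfind : ∃ ln', lines.reverse.find? (fun ln => PySem.Str.startswith ln c) = some ln' := by
      have : (lines.reverse.find? (fun ln => PySem.Str.startswith ln c)).isSome := by
        rw [List.find?_isSome]
        exact ⟨ln, List.mem_reverse.mpr hln, hsw⟩
      exact Option.isSome_iff_exists.mp this
    obtain ⟨ln', hln'⟩ := hfind
    rw [PySem.Dict.getD_eq_get?_getD,
      pv_get_foldl_insert (α := String × String) (fun p => pvKeyOf p.1) (fun p => pvVerdictB p.2)
        (pvMp lines) PySem.Dict.empty (pvKeyOf c)]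
    rw [show (pvMp lines).reverse = pvMp lines.reverse from by
      rw [pvMp, pvMp, List.filterMap_reverse]]
    rw [pv_find_mp hcC lines.reverse, hln']
    rw [pvVB, hln']
    rfl
  rw [PySem.Dict.items_eq_map_keys _ hnodupA "tie", hkeys, List.map_map]
  exact List.map_congr_left (fun c hc => by
    simp only [Function.comp_apply]
    rw [hval c hc])

-- B's fold over the criteria = a fold of inserts over the present criteria
theorem pv_foldB (lines : List String) (cs : List String) (d : PySem.Dict String String) :
    cs.foldl (pvStepB lines) d =
      (cs.filter (fun c =>
          (lines.reverse.find? (fun ln => PySem.Str.startswith ln c)).isSome)).foldl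
        (fun d c => d.insert (pvKeyOf c) (pvVB lines c)) d := by
  induction cs generalizing d with
  | nil => rfl
  | cons c rest ih =>
    cases h : lines.reverse.find? (fun ln => PySem.Str.startswith ln c) with
    | none =>
      rw [List.foldl_cons, pvStepB, h,
        List.filter_cons_of_neg (by simp only [h, Option.isSome_none]; decide)]
      exact ih d
    | some ln =>
      rw [List.foldl_cons, pvStepB, h,
        List.filter_cons_of_pos (by simp only [h, Option.isSome_some]), List.foldl_cons,
        show pvVB lines c = pvVerdictB ln from by rw [pvVB, h]; rfl]
      exact ih _

-- filtering a nodup list down to a sublist's members recovers the sublist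
theorem pv_filter_sublist :
    ∀ (c l : List String), l.Sublist c → c.Nodup →
      c.filter (fun x => decide (x ∈ l)) = l := by
  intro c
  induction c with
  | nil =>
    intro l hs _
    rw [List.sublist_nil.mp hs]
    rfl
  | cons a c ih =>
    intro l hs hn
    cases hs with
    | cons _ h =>
      have ha : a ∉ l := fun hal => (List.nodup_cons.mp hn).1 (h.subset hal)
      rw [List.filter_cons_of_neg (by simpa using ha)]
      exact ih l h (List.nodup_cons.mp hn).2
    | cons₂ _ h =>
      rename_i l₁
      rw [List.filter_cons_of_pos (by simp)]
      have hcongr : c.filter (fun x => decide (x ∈ a :: l₁)) =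
          c.filter (fun x => decide (x ∈ l₁)) := by
        apply List.filter_congr
        intro x hx
        have hxa : x ≠ a := fun e => (List.nodup_cons.mp hn).1 (e ▸ hx)
        simp [List.mem_cons, hxa]
      rw [hcongr, ih l₁ h (List.nodup_cons.mp hn).2]

-- the whole claim, over an arbitrary list of lines whose first appearances are in criteria order
theorem pv_main (lines : List String)
    (hPre : (PySem.Set.ofList (pvMs lines)).Sublist pvCriteria) :
    (lines.foldl (fun scores line => pvCriteria.foldl (pvStepA line) scores)
        PySem.Dict.empty).items =
      (pvCriteria.foldl (pvStepB lines) PySem.Dict.empty).items := by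
  have hms_sub : ∀ c ∈ pvMs lines, c ∈ pvCriteria := by
    intro c hc
    rw [pvMs, List.mem_filterMap] at hc
    obtain ⟨ln, _, hm⟩ := hc
    exact (pv_find_mem hm).1
  -- the present-criteria filter equals the first-appearance set
  have hfilter : pvCriteria.filter (fun c =>
      (lines.reverse.find? (fun ln => PySem.Str.startswith ln c)).isSome) =
      PySem.Set.ofList (pvMs lines) := by
    have hcongr : pvCriteria.filter (fun c =>
        (lines.reverse.find? (fun ln => PySem.Str.startswith ln c)).isSome) =
        pvCriteria.filter (fun c => decide (c ∈ PySem.Set.ofList (pvMs lines))) := by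
      apply List.filter_congr
      intro c hcC
      have hiff : (lines.reverse.find? (fun ln => PySem.Str.startswith ln c)).isSome = true ↔
          c ∈ PySem.Set.ofList (pvMs lines) := by
        rw [List.find?_isSome, PySem.Set.mem_ofList, pvMs, List.mem_filterMap]
        constructor
        · rintro ⟨ln, hln, hsw⟩
          exact ⟨ln, List.mem_reverse.mp hln, pv_find_of_sw hcC hsw⟩
        · rintro ⟨ln, hln, hfind⟩
          exact ⟨ln, List.mem_reverse.mpr hln, (pv_find_mem hfind).2⟩
      by_cases hmem : c ∈ PySem.Set.ofList (pvMs lines)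
      · rw [hiff.mpr hmem]
        exact (decide_eq_true hmem).symm
      · have h0 : (lines.reverse.find? (fun ln => PySem.Str.startswith ln c)).isSome = false := by
          cases hb : (lines.reverse.find? (fun ln => PySem.Str.startswith ln c)).isSome
          · rfl
          · exact absurd (hiff.mp hb) hmem
        rw [h0]
        exact (decide_eq_false hmem).symm
    rw [hcongr]
    exact pv_filter_sublist pvCriteria _ hPre (by decide)
  -- B's items
  have hBnodup : ((pvCriteria.filter (fun c =>
      (lines.reverse.find? (fun ln => PySem.Str.startswith ln c)).isSome)).map pvKeyOf).Nodup := by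
    rw [hfilter]
    exact List.Nodup.map_on
      (fun a ha b hb => pv_key_inj a (hms_sub a ((PySem.Set.mem_ofList _ _).mp ha))
        b (hms_sub b ((PySem.Set.mem_ofList _ _).mp hb)))
      (PySem.Set.nodup_ofList _)
  rw [pv_itemsA lines, pv_foldB lines pvCriteria PySem.Dict.empty,
    PySem.Dict.items_foldl_insert_fresh _ _ _ _
      (fun c _ => PySem.Dict.contains_empty _) hBnodup, hfilter]
  simp [PySem.Dict.empty]

-- ===== VERDICT (by name: the statement is the Claim_ definition above) =====
theorem parse_comparison_scores_py_spec : Claim_equal_parse_comparison_scores_py := by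
  intro comparison_text _ hPre
  unfold Spec_parse_comparison_scores_py parse_comparison_scores_py parse_comparison_scores_py_alt
  exact pv_main (pvSplit comparison_text "\n") hPre
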